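-- pv_equiv track=rewrite | github.com/ironiclawdoctor-design/deception-floor-commodity-factory | autoresearch-pronouns/skill_v6.py | cap_sentence_start
-- ===== SOURCE A (Python) =====
-- def cap_sentence_start(t):
--     result = []
--     i = 0
--     while i < len(t):
--         if i == 0 and t[i].isalpha():
--             result.append(t[i].upper())
--             i += 1
--         elif t[i:i+2] == '. ' and i + 2 < len(t) and t[i+2].isalpha():
--             result.append('. ')
--             result.append(t[i+2].upper())
--             i += 3
--         elif t[i:i+3] == '." ' and i + 3 < len(t) and t[i+3].isalpha():
--             result.append('." ')
--             result.append(t[i+3].upper())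
--             i += 4
--         else:
--             result.append(t[i])
--             i += 1
--     return ''.join(result)
-- ===== SOURCE B (Python) =====
-- def cap_sentence_start(t):
--     n = len(t)
--     targets = set()
--     for j in range(n):
--         if t[j].isalpha() and (
--             j == 0
--             or (j >= 2 and t[j-2:j] == '. ')
--             or (j >= 3 and t[j-3:j] == '." ')
--         ):
--             targets.add(j)
--     return ''.join(t[j].upper() if j in targets else t[j] for j in range(n))
-- ===== Notes on version B (the rewrite author's own statement) =====
-- stated objective: alternative
-- what changed: Replaces A's lookahead-and-skip pointer loop (which emits variable-length pieces and advances by 1, 3 or 4) by a two-phase fixed-stride pass: first collect the set of indices to uppercase by looking BEHIND at each position, then rebuild the string position by position.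
import Mathlib
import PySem

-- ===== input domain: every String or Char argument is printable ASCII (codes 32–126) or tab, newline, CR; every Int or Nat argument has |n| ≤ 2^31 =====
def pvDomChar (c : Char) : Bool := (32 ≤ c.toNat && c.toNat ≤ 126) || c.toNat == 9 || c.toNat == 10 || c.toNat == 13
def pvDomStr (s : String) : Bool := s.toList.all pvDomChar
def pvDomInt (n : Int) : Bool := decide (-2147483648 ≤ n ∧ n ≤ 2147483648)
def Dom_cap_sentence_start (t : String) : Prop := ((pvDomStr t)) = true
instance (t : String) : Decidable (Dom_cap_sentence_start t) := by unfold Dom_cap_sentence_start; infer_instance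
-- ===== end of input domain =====

-- B replaces A's lookahead-and-skip pointer loop by a two-phase fixed-stride pass
-- (collect the index set to uppercase by looking behind, then rebuild the string); objective: alternative.


-- ===== PORT A =====
-- the while loop with pointer i, as structural recursion on s.length - i; '.isalpha()'/'.upper()'
-- on the one-char string t[i] are PySem.Chars.isalpha / upperChar (exact on the ASCII domain).
def capA_loop (s : List Char) (i : Nat) (acc : List Char) : List Char :=
  if _h : i < s.length then
    if i == 0 && PySem.Chars.isalpha (s.getD i ' ') then
      capA_loop s (i + 1) (acc ++ [PySem.Chars.upperChar (s.getD i ' ')])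
    else if (PySem.List.slice s (some (i : Int)) (some ((i : Int) + 2)) == ['.', ' '])
        && decide (i + 2 < s.length) && PySem.Chars.isalpha (s.getD (i + 2) ' ') then
      capA_loop s (i + 3) ((acc ++ ['.', ' ']) ++ [PySem.Chars.upperChar (s.getD (i + 2) ' ')])
    else if (PySem.List.slice s (some (i : Int)) (some ((i : Int) + 3)) == ['.', '"', ' '])
        && decide (i + 3 < s.length) && PySem.Chars.isalpha (s.getD (i + 3) ' ') then
      capA_loop s (i + 4) ((acc ++ ['.', '"', ' ']) ++ [PySem.Chars.upperChar (s.getD (i + 3) ' ')])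
    else
      capA_loop s (i + 1) (acc ++ [s.getD i ' '])
  else acc
  termination_by s.length - i

def cap_sentence_start (t : String) : String :=
  String.ofList (capA_loop t.toList 0 [])

-- ===== PORT B =====
-- per-index look-behind condition, same guard order as in Source B
def condB (s : List Char) (j : Nat) : Bool :=
  PySem.Chars.isalpha (s.getD j ' ')
    && (j == 0
        || (decide (2 ≤ j) && (PySem.List.slice s (some ((j : Int) - 2)) (some (j : Int)) == ['.', ' ']))
        || (decide (3 ≤ j) && (PySem.List.slice s (some ((j : Int) - 3)) (some (j : Int)) == ['.', '"', ' '])))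

def capB_targets (s : List Char) : PySem.Set Nat :=
  (List.range s.length).foldl
    (fun acc j => if condB s j then PySem.Set.add acc j else acc) PySem.Set.empty

def cap_sentence_start_alt (t : String) : String :=
  let s := t.toList
  let targets := capB_targets s
  String.ofList ((List.range s.length).map
    (fun j => if PySem.Set.contains targets j then PySem.Chars.upperChar (s.getD j ' ') else s.getD j ' '))

-- ===== PRECONDITION & SPEC =====
def Spec_cap_sentence_start (t : String) (out : String) : Prop := out = cap_sentence_start_alt t
instance (t : String) (out : String) : Decidable (Spec_cap_sentence_start t out) := by unfold Spec_cap_sentence_start; infer_instance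

-- ===== CLAIM (what is proved, stated in full; the proofs are below) =====
def Claim_equal_cap_sentence_start : Prop := ∀ (t : String), Dom_cap_sentence_start t → Spec_cap_sentence_start t (cap_sentence_start t)

-- ===== LEMMAS AND PROOFS =====

-- a '. X' sentence boundary starting at k
def mD (s : List Char) (k : Nat) : Prop :=
  k + 2 < s.length ∧ s.getD k ' ' = '.' ∧ s.getD (k + 1) ' ' = ' '
    ∧ PySem.Chars.isalpha (s.getD (k + 2) ' ') = true

-- a '." X' sentence boundary starting at k
def mQ (s : List Char) (k : Nat) : Prop :=
  k + 3 < s.length ∧ s.getD k ' ' = '.' ∧ s.getD (k + 1) ' ' = '"' ∧ s.getD (k + 2) ' ' = ' '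
    ∧ PySem.Chars.isalpha (s.getD (k + 3) ' ') = true

-- invariant of A's pointer loop: no boundary pattern straddles position i
def Hinv (s : List Char) (i : Nat) : Prop :=
  (∀ k, k < i → i ≤ k + 2 → ¬ mD s k) ∧ (∀ k, k < i → i ≤ k + 3 → ¬ mQ s k)

-- the per-position result both programs compute
def fmap (s : List Char) (j : Nat) : Char :=
  if condB s j then PySem.Chars.upperChar (s.getD j ' ') else s.getD j ' '

theorem drop_take_two {s : List Char} {i : Nat} (h : i + 1 < s.length) :
    (s.drop i).take 2 = [s.getD i ' ', s.getD (i + 1) ' '] := by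
  apply List.ext_getElem
  · simp; omega
  · intro n h1 h2
    have h2' : n < 2 := by simp at h2; omega
    simp only [List.getElem_take, List.getElem_drop]
    interval_cases n <;>
      simp only [List.getElem_cons_zero, List.getElem_cons_succ, Nat.add_zero] <;>
      rw [List.getD_eq_getElem _ _ (by omega)]

theorem drop_take_three {s : List Char} {i : Nat} (h : i + 2 < s.length) :
    (s.drop i).take 3 = [s.getD i ' ', s.getD (i + 1) ' ', s.getD (i + 2) ' '] := by
  apply List.ext_getElem
  · simp; omega
  · intro n h1 h2
    have h2' : n < 3 := by simp at h2; omega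
    simp only [List.getElem_take, List.getElem_drop]
    interval_cases n <;>
      simp only [List.getElem_cons_zero, List.getElem_cons_succ, Nat.add_zero] <;>
      rw [List.getD_eq_getElem _ _ (by omega)]

theorem slice2_iff (s : List Char) (i : Nat) :
    PySem.List.slice s (some (i : Int)) (some ((i : Int) + 2)) = ['.', ' ']
      ↔ i + 1 < s.length ∧ s.getD i ' ' = '.' ∧ s.getD (i + 1) ' ' = ' ' := by
  have e : PySem.List.slice s (some (i : Int)) (some ((i : Int) + 2)) = (s.drop i).take 2 := by
    have := PySem.List.slice_natCast_add (xs := s) (j := i) (n := 2)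
    simpa using this
  rw [e]
  constructor
  · intro hEq
    have hlen := congrArg List.length hEq
    simp at hlen
    have hb : i + 1 < s.length := by omega
    rw [drop_take_two hb] at hEq
    simp at hEq
    exact ⟨hb, hEq.1, hEq.2⟩
  · rintro ⟨hb, h1, h2⟩
    rw [drop_take_two hb, h1, h2]

theorem slice3_iff (s : List Char) (i : Nat) :
    PySem.List.slice s (some (i : Int)) (some ((i : Int) + 3)) = ['.', '"', ' ']
      ↔ i + 2 < s.length ∧ s.getD i ' ' = '.' ∧ s.getD (i + 1) ' ' = '"' ∧ s.getD (i + 2) ' ' = ' ' := by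
  have e : PySem.List.slice s (some (i : Int)) (some ((i : Int) + 3)) = (s.drop i).take 3 := by
    have := PySem.List.slice_natCast_add (xs := s) (j := i) (n := 3)
    simpa using this
  rw [e]
  constructor
  · intro hEq
    have hlen := congrArg List.length hEq
    simp at hlen
    have hb : i + 2 < s.length := by omega
    rw [drop_take_three hb] at hEq
    simp at hEq
    exact ⟨hb, hEq.1, hEq.2.1, hEq.2.2⟩
  · rintro ⟨hb, h1, h2, h3⟩
    rw [drop_take_three hb, h1, h2, h3]

theorem branch2_iff (s : List Char) (i : Nat) :
    ((PySem.List.slice s (some (i : Int)) (some ((i : Int) + 2)) == ['.', ' '])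
        && decide (i + 2 < s.length) && PySem.Chars.isalpha (s.getD (i + 2) ' ')) = true
      ↔ mD s i := by
  simp only [Bool.and_eq_true, beq_iff_eq, decide_eq_true_eq, slice2_iff, mD]
  constructor
  · rintro ⟨⟨⟨_, h1, h2⟩, hb⟩, ha⟩; exact ⟨hb, h1, h2, ha⟩
  · rintro ⟨hb, h1, h2, ha⟩; exact ⟨⟨⟨by omega, h1, h2⟩, hb⟩, ha⟩

theorem branch3_iff (s : List Char) (i : Nat) :
    ((PySem.List.slice s (some (i : Int)) (some ((i : Int) + 3)) == ['.', '"', ' '])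
        && decide (i + 3 < s.length) && PySem.Chars.isalpha (s.getD (i + 3) ' ')) = true
      ↔ mQ s i := by
  simp only [Bool.and_eq_true, beq_iff_eq, decide_eq_true_eq, slice3_iff, mQ]
  constructor
  · rintro ⟨⟨⟨_, h1, h2, h3⟩, hb⟩, ha⟩; exact ⟨hb, h1, h2, h3, ha⟩
  · rintro ⟨hb, h1, h2, h3, ha⟩; exact ⟨⟨⟨by omega, h1, h2, h3⟩, hb⟩, ha⟩

theorem condB_iff (s : List Char) (j : Nat) (hj : j < s.length) :
    condB s j = true
      ↔ (PySem.Chars.isalpha (s.getD j ' ') = true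
          ∧ (j = 0 ∨ (2 ≤ j ∧ mD s (j - 2)) ∨ (3 ≤ j ∧ mQ s (j - 3)))) := by
  unfold condB
  simp only [Bool.and_eq_true, Bool.or_eq_true, beq_iff_eq, decide_eq_true_eq]
  apply and_congr_right
  intro ha
  constructor
  · rintro ((h0 | ⟨h2, hs⟩) | ⟨h3, hs⟩)
    · exact Or.inl h0
    · refine Or.inr (Or.inl ⟨h2, ?_⟩)
      have e1 : (j : Int) - 2 = ((j - 2 : Nat) : Int) := by omega
      have e2 : (j : Int) = ((j - 2 : Nat) : Int) + 2 := by omega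
      rw [e1, e2, slice2_iff] at hs
      obtain ⟨_, c1, c2⟩ := hs
      have e3 : j - 2 + 1 = j - 1 := by omega
      have e4 : j - 2 + 2 = j := by omega
      exact ⟨by omega, c1, by rw [e3] at c2 ⊢; exact c2, by rw [e4]; exact ha⟩
    · refine Or.inr (Or.inr ⟨h3, ?_⟩)
      have e1 : (j : Int) - 3 = ((j - 3 : Nat) : Int) := by omega
      have e2 : (j : Int) = ((j - 3 : Nat) : Int) + 3 := by omega
      rw [e1, e2, slice3_iff] at hs
      obtain ⟨_, c1, c2, c3⟩ := hs
      have e4 : j - 3 + 3 = j := by omega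
      exact ⟨by omega, c1, c2, c3, by rw [e4]; exact ha⟩
  · rintro (h0 | ⟨h2, hm⟩ | ⟨h3, hm⟩)
    · exact Or.inl (Or.inl h0)
    · refine Or.inl (Or.inr ⟨h2, ?_⟩)
      obtain ⟨hb, c1, c2, _⟩ := hm
      have e1 : (j : Int) - 2 = ((j - 2 : Nat) : Int) := by omega
      have e2 : (j : Int) = ((j - 2 : Nat) : Int) + 2 := by omega
      rw [e1, e2, slice2_iff]
      exact ⟨by omega, c1, c2⟩
    · refine Or.inr ⟨h3, ?_⟩
      obtain ⟨hb, c1, c2, c3, _⟩ := hm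
      have e1 : (j : Int) - 3 = ((j - 3 : Nat) : Int) := by omega
      have e2 : (j : Int) = ((j - 3 : Nat) : Int) + 3 := by omega
      rw [e1, e2, slice3_iff]
      exact ⟨by omega, c1, c2, c3⟩

theorem condB_false_of_alpha (s : List Char) (j : Nat)
    (h : PySem.Chars.isalpha (s.getD j ' ') = false) : condB s j = false := by
  unfold condB; rw [h]; rfl

theorem contains_add (s : PySem.Set Nat) (y x : Nat) :
    PySem.Set.contains (PySem.Set.add s y) x = (PySem.Set.contains s x || x == y) := by
  unfold PySem.Set.add PySem.Set.contains
  by_cases hx : x = y <;> split <;> simp_all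

theorem contains_foldl (l : List Nat) (p : Nat → Bool) (init : PySem.Set Nat) (x : Nat) :
    PySem.Set.contains
        (l.foldl (fun a j => if p j then PySem.Set.add a j else a) init) x
      = (PySem.Set.contains init x || (l.contains x && p x)) := by
  induction l generalizing init with
  | nil => simp
  | cons a l ih =>
    simp only [List.foldl_cons]
    by_cases hpa : p a = true
    · rw [if_pos hpa, ih, contains_add]
      by_cases hx : x = a
      · simp_all
      · have hb : (x == a) = false := by simpa using hx
        simp [hb, List.mem_cons, hx]
    · rw [if_neg hpa, ih]
      by_cases hx : x = a <;> simp_all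

theorem contains_targets (s : List Char) (j : Nat) (hj : j < s.length) :
    PySem.Set.contains (capB_targets s) j = condB s j := by
  unfold capB_targets
  rw [contains_foldl]
  have h1 : PySem.Set.contains PySem.Set.empty j = false := rfl
  have h2 : (List.range s.length).contains j = true := by
    simp [List.mem_range, hj]
  rw [h1, h2]
  simp

theorem capA_loop_eq (s : List Char) :
    ∀ m i acc, s.length - i ≤ m → Hinv s i →
      capA_loop s i acc = acc ++ (List.range' i (s.length - i)).map (fmap s) := by
  intro m
  induction m with
  | zero =>
    intro i acc hm _
    have hn : ¬ i < s.length := by omega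
    have h0 : s.length - i = 0 := by omega
    rw [capA_loop, dif_neg hn, h0]
    simp
  | succ m ih =>
    intro i acc hm hH
    by_cases hlt : i < s.length
    · rw [capA_loop, dif_pos hlt]
      by_cases b1 : (i == 0 && PySem.Chars.isalpha (s.getD i ' ')) = true
      · -- branch 1: i = 0 and alphabetic
        rw [if_pos b1]
        rw [Bool.and_eq_true, beq_iff_eq] at b1
        obtain ⟨hi0, ha⟩ := b1
        subst hi0
        have hH1 : Hinv s 1 := by
          constructor <;> intro k hk _ hmk
          · interval_cases k
            obtain ⟨_, d1, _⟩ := hmk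
            rw [d1] at ha; exact absurd ha (by decide)
          · interval_cases k
            obtain ⟨_, d1, _⟩ := hmk
            rw [d1] at ha; exact absurd ha (by decide)
        rw [ih 1 _ (by omega) hH1]
        have hd : s.length - 0 = (s.length - 1) + 1 := by omega
        rw [hd, List.range'_succ, List.map_cons]
        have hf : fmap s 0 = PySem.Chars.upperChar (s.getD 0 ' ') := by
          unfold fmap
          rw [if_pos ((condB_iff s 0 hlt).mpr ⟨ha, Or.inl rfl⟩)]
        simp [hf]
      · rw [if_neg b1]
        by_cases b2 : ((PySem.List.slice s (some (i : Int)) (some ((i : Int) + 2)) == ['.', ' '])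
            && decide (i + 2 < s.length) && PySem.Chars.isalpha (s.getD (i + 2) ' ')) = true
        · -- branch 2: '. X'
          rw [if_pos b2]
          obtain ⟨hb, c1, c2, ca⟩ := (branch2_iff s i).mp b2
          have hH3 : Hinv s (i + 3) := by
            constructor <;> intro k hk hik hmk
            · have : k = i + 1 ∨ k = i + 2 := by omega
              rcases this with rfl | rfl
              · obtain ⟨_, d1, _⟩ := hmk; rw [c2] at d1; exact absurd d1 (by decide)
              · obtain ⟨_, d1, _⟩ := hmk; rw [d1] at ca; exact absurd ca (by decide)
            · have : k = i ∨ k = i + 1 ∨ k = i + 2 := by omega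
              rcases this with rfl | rfl | rfl
              · obtain ⟨_, _, d2, _⟩ := hmk; rw [c2] at d2; exact absurd d2 (by decide)
              · obtain ⟨_, d1, _⟩ := hmk; rw [c2] at d1; exact absurd d1 (by decide)
              · obtain ⟨_, d1, _⟩ := hmk; rw [d1] at ca; exact absurd ca (by decide)
          rw [ih (i + 3) _ (by omega) hH3]
          have hd : s.length - i = ((s.length - (i + 3)) + 1 + 1) + 1 := by omega
          rw [hd, List.range'_succ, List.range'_succ, List.range'_succ]
          have hf0 : fmap s i = '.' := by
            unfold fmap
            rw [condB_false_of_alpha s i (by rw [c1]; decide), if_neg (by simp), c1]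
          have hf1 : fmap s (i + 1) = ' ' := by
            unfold fmap
            rw [condB_false_of_alpha s (i + 1) (by rw [c2]; decide), if_neg (by simp), c2]
          have hf2 : fmap s (i + 2) = PySem.Chars.upperChar (s.getD (i + 2) ' ') := by
            unfold fmap
            rw [if_pos ((condB_iff s (i + 2) hb).mpr
              ⟨ca, Or.inr (Or.inl ⟨by omega, by simpa using ⟨hb, c1, c2, ca⟩⟩)⟩)]
          simp only [List.map_cons, hf0, hf1, hf2]
          simp
        · rw [if_neg b2]
          by_cases b3 : ((PySem.List.slice s (some (i : Int)) (some ((i : Int) + 3)) == ['.', '"', ' '])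
              && decide (i + 3 < s.length) && PySem.Chars.isalpha (s.getD (i + 3) ' ')) = true
          · -- branch 3: '." X'
            rw [if_pos b3]
            obtain ⟨hb, c1, c2, c3, ca⟩ := (branch3_iff s i).mp b3
            have hH4 : Hinv s (i + 4) := by
              constructor <;> intro k hk hik hmk
              · have : k = i + 2 ∨ k = i + 3 := by omega
                rcases this with rfl | rfl
                · obtain ⟨_, d1, _⟩ := hmk; rw [c3] at d1; exact absurd d1 (by decide)
                · obtain ⟨_, d1, _⟩ := hmk; rw [d1] at ca; exact absurd ca (by decide)
              · have : k = i + 1 ∨ k = i + 2 ∨ k = i + 3 := by omega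
                rcases this with rfl | rfl | rfl
                · obtain ⟨_, d1, _⟩ := hmk; rw [c2] at d1; exact absurd d1 (by decide)
                · obtain ⟨_, d1, _⟩ := hmk; rw [c3] at d1; exact absurd d1 (by decide)
                · obtain ⟨_, d1, _⟩ := hmk; rw [d1] at ca; exact absurd ca (by decide)
            rw [ih (i + 4) _ (by omega) hH4]
            have hd : s.length - i = (((s.length - (i + 4)) + 1 + 1) + 1) + 1 := by omega
            rw [hd, List.range'_succ, List.range'_succ, List.range'_succ, List.range'_succ]
            have hf0 : fmap s i = '.' := by
              unfold fmap
              rw [condB_false_of_alpha s i (by rw [c1]; decide), if_neg (by simp), c1]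
            have hf1 : fmap s (i + 1) = '"' := by
              unfold fmap
              rw [condB_false_of_alpha s (i + 1) (by rw [c2]; decide), if_neg (by simp), c2]
            have hf2 : fmap s (i + 2) = ' ' := by
              unfold fmap
              rw [condB_false_of_alpha s (i + 2) (by rw [c3]; decide), if_neg (by simp), c3]
            have hf3 : fmap s (i + 3) = PySem.Chars.upperChar (s.getD (i + 3) ' ') := by
              unfold fmap
              rw [if_pos ((condB_iff s (i + 3) hb).mpr
                ⟨ca, Or.inr (Or.inr ⟨by omega, by simpa using ⟨hb, c1, c2, c3, ca⟩⟩)⟩)]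
            simp only [List.map_cons, hf0, hf1, hf2, hf3]
            simp
          · -- else branch
            rw [if_neg b3]
            have hnd : ¬ mD s i := fun h => b2 ((branch2_iff s i).mpr h)
            have hnq : ¬ mQ s i := fun h => b3 ((branch3_iff s i).mpr h)
            have hH1 : Hinv s (i + 1) := by
              constructor <;> intro k hk hik hmk
              · rcases Nat.lt_or_ge k i with hki | hki
                · exact hH.1 k hki (by omega) hmk
                · have : k = i := by omega
                  exact hnd (this ▸ hmk)
              · rcases Nat.lt_or_ge k i with hki | hki
                · exact hH.2 k hki (by omega) hmk
                · have : k = i := by omega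
                  exact hnq (this ▸ hmk)
            rw [ih (i + 1) _ (by omega) hH1]
            have hd : s.length - i = (s.length - (i + 1)) + 1 := by omega
            rw [hd, List.range'_succ, List.map_cons]
            have hf : fmap s i = s.getD i ' ' := by
              unfold fmap
              rw [if_neg]
              intro hc
              obtain ⟨ha, hdisj⟩ := (condB_iff s i hlt).mp hc
              rcases hdisj with rfl | ⟨h2, hm'⟩ | ⟨h3, hm'⟩
              · exact b1 (by simpa using ha)
              · exact hH.1 (i - 2) (by omega) (by omega) hm'
              · exact hH.2 (i - 3) (by omega) (by omega) hm'
            simp [hf]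
    · rw [capA_loop, dif_neg hlt]
      have h0 : s.length - i = 0 := by omega
      rw [h0]; simp

theorem final (t : String) : cap_sentence_start t = cap_sentence_start_alt t := by
  unfold cap_sentence_start cap_sentence_start_alt
  have hH0 : Hinv t.toList 0 := ⟨fun k hk => by omega, fun k hk => by omega⟩
  rw [capA_loop_eq t.toList t.toList.length 0 [] (by omega) hH0]
  congr 1
  rw [List.range_eq_range'] at *
  simp only [Nat.sub_zero]
  apply List.map_congr_left
  intro j hj
  have hjlt : j < t.toList.length := by
    rw [← List.range_eq_range'] at hj
    exact List.mem_range.mp hj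
  rw [contains_targets t.toList j hjlt]
  unfold fmap
  rfl

-- ===== VERDICT (by name: the statement is the Claim_ definition above) =====
theorem cap_sentence_start_spec : Claim_equal_cap_sentence_start := by
  intro t _
  unfold Spec_cap_sentence_start
  exact final t
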